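-- pv_equiv track=rewrite | github.com/skyoxu/sanguo | scripts/python/update_t2_overflow_toast_task17.py | replace_line_containing
-- ===== SOURCE A (Python) =====
-- def replace_line_containing(text: str, needle: str, replacement: str) -> str:
--     lines = text.splitlines()
--     replaced = False
--     out: list[str] = []
--     for ln in lines:
--         if needle in ln:
--             out.append(replacement)
--             replaced = True
--         else:
--             out.append(ln)
--     if not replaced:
--         out.append(replacement)
--     return "\n".join(out).rstrip("\n") + "\n"
-- ===== SOURCE B (Python) =====
-- def replace_line_containing(text: str, needle: str, replacement: str) -> str:
--     def go(lines: list[str], found: bool) -> list[str]: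
--         # Recurse on the line list; decide the trailing append at the base case.
--         if not lines:
--             return [] if found else [replacement]
--         ln, rest = lines[0], lines[1:]
--         if needle in ln:
--             return [replacement] + go(rest, True)
--         return [ln] + go(rest, found)
--     return "\n".join(go(text.splitlines(), False)).rstrip("\n") + "\n"
-- ===== Notes on version B (the rewrite author's own statement) =====
-- stated objective: alternative
-- what changed: Replaces A's iterative loop with a mutable replaced-flag and out list plus a post-loop append by a structural recursion over the line list that threads the found state and decides the no-match append at the base case, building the result by consing.
import Mathlib
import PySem

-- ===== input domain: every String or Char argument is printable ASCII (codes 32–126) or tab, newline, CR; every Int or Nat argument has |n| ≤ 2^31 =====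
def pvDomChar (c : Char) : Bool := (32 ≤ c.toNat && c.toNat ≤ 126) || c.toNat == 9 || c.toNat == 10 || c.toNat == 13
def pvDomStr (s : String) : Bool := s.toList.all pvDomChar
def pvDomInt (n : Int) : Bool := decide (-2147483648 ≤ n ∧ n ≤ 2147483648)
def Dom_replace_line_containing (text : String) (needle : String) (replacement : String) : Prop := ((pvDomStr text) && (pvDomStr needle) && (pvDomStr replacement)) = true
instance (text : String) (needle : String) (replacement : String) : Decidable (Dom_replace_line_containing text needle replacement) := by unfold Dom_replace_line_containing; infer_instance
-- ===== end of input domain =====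

-- B: structural recursion threading a found flag, appending at the base case, instead of A's iterative flag-accumulator loop with a post-loop append (alternative decomposition, same cost).


-- ===== PORT A =====
-- rstrip("\n") on List Char (PySem has no chars-argument rstrip): drop trailing '\n's -- exact port of str.rstrip("\n")
def pvRstripNL (cs : List Char) : List Char := (cs.reverse.dropWhile (fun c => c == '\n')).reverse

def replace_line_containing (text : String) (needle : String) (replacement : String) : String :=
  let lines := PySem.Str.splitlines text
  let st := lines.foldl (fun (acc : List String × Bool) ln =>
      if PySem.Str.isIn needle ln then (acc.1 ++ [replacement], true)
      else (acc.1 ++ [ln], acc.2)) ([], false)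
  let out := if st.2 = false then st.1 ++ [replacement] else st.1
  String.ofList (pvRstripNL (PySem.Str.join "\n" out).toList ++ ['\n'])

-- ===== PORT B =====
-- port of Source B's inner recursive 'go'
def pvGoB (needle replacement : String) : List String → Bool → List String
  | [], found => if found then [] else [replacement]
  | ln :: rest, found =>
      if PySem.Str.isIn needle ln then replacement :: pvGoB needle replacement rest true
      else ln :: pvGoB needle replacement rest found

def replace_line_containing_alt (text : String) (needle : String) (replacement : String) : String :=
  String.ofList (pvRstripNL (PySem.Str.join "\n" (pvGoB needle replacement (PySem.Str.splitlines text) false)).toList ++ ['\n'])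

-- ===== PRECONDITION & SPEC =====
def Spec_replace_line_containing (text : String) (needle : String) (replacement : String) (out : String) : Prop := out = replace_line_containing_alt text needle replacement
instance (text : String) (needle : String) (replacement : String) (out : String) : Decidable (Spec_replace_line_containing text needle replacement out) := by unfold Spec_replace_line_containing; infer_instance

-- ===== CLAIM (what is proved, stated in full; the proofs are below) =====
def Claim_equal_replace_line_containing : Prop := ∀ (text : String) (needle : String) (replacement : String), Dom_replace_line_containing text needle replacement → Spec_replace_line_containing text needle replacement (replace_line_containing text needle replacement)

-- ===== LEMMAS AND PROOFS =====
lemma pv_foldl_flag (p : String → Bool) (r : String) (lines : List String)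
    (acc : List String × Bool) :
    lines.foldl (fun (acc : List String × Bool) ln =>
      if p ln then (acc.1 ++ [r], true) else (acc.1 ++ [ln], acc.2)) acc
    = (acc.1 ++ lines.map (fun ln => if p ln then r else ln), acc.2 || lines.any p) := by
  induction lines generalizing acc with
  | nil => simp
  | cons l ls ih =>
    simp only [List.foldl_cons, List.map_cons, List.any_cons]
    cases h : p l <;> simp [h, ih]

lemma pv_goB_eq (needle r : String) (lines : List String) (found : Bool) :
    pvGoB needle r lines found
    = lines.map (fun ln => if PySem.Str.isIn needle ln then r else ln)
      ++ (if found || lines.any (fun ln => PySem.Str.isIn needle ln) then [] else [r]) := by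
  induction lines generalizing found with
  | nil => cases found <;> simp [pvGoB]
  | cons l ls ih =>
    simp only [pvGoB, ih, List.map_cons, List.any_cons]
    by_cases h : PySem.Str.isIn needle l = true
    · rw [if_pos h, if_pos h]
      simp only [h]
      simp
    · rw [if_neg h, if_neg h]
      rw [Bool.not_eq_true] at h
      simp only [h]
      simp

-- ===== VERDICT (by name: the statement is the Claim_ definition above) =====
theorem replace_line_containing_spec : Claim_equal_replace_line_containing := by
  intro text needle replacement _
  unfold Spec_replace_line_containing replace_line_containing replace_line_containing_alt
  simp only [pv_foldl_flag, pv_goB_eq, List.nil_append, Bool.false_or]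
  cases h : (PySem.Str.splitlines text).any (fun ln => PySem.Str.isIn needle ln)
  · rw [if_pos rfl, if_neg (by simp [h])]
  · rw [if_neg (by simp [h]), if_pos (by simp [h])]
    simp
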